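-- pv_equiv track=rewrite | github.com/PrimeTimeTran/data-structures-algorithms | python/problems/Deletion Distance.py | helper1
-- ===== SOURCE A (Python) =====
-- from collections import Counter, OrderedDict
--
-- def helper1(s1, s2):
--   c1 = Counter(s1)
--   c2 = Counter(s2)
--
--   res = 0
--   for key, val in c1.items():
--     if not c1[key] == c2[key]:
--       res += 1
--
--   for key, val in c2.items():
--     if not c1[key] == c2[key]:
--       res += 1
--
--   return res
-- ===== SOURCE B (Python) =====
-- def helper1(s1, s2):
--   t1, t2 = sorted(s1), sorted(s2)
--   n1, n2 = len(t1), len(t2)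
--   i = j = 0
--   res = 0
--   while i < n1 or j < n2:
--     if j == n2 or (i < n1 and t1[i] < t2[j]):
--       c = t1[i]
--       while i < n1 and t1[i] == c:
--         i += 1
--       res += 1
--     elif i == n1 or t2[j] < t1[i]:
--       c = t2[j]
--       while j < n2 and t2[j] == c:
--         j += 1
--       res += 1
--     else:
--       c = t1[i]
--       a = b = 0
--       while i < n1 and t1[i] == c:
--         i += 1
--         a += 1
--       while j < n2 and t2[j] == c:
--         j += 1
--         b += 1
--       if a != b:
--         res += 2
--   return res
-- ===== Notes on version B (the rewrite author's own statement) =====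
-- stated objective: alternative
-- what changed: Drops the Counter dictionaries entirely: B sorts both strings and does a two-pointer merge over the sorted character runs, comparing run lengths of equal characters and charging unmatched runs, instead of A's two hash-counting loops.
import Mathlib
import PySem

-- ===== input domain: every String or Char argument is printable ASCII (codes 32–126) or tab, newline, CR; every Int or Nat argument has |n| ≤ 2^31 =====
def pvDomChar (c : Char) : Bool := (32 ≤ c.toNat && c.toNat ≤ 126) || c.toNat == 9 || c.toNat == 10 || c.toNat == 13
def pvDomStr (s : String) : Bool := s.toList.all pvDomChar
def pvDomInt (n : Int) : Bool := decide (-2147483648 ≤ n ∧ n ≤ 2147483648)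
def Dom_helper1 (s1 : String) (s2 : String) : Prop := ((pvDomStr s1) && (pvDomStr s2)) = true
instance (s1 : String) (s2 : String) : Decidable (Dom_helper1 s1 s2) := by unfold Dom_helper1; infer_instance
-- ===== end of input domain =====

-- B drops the Counter dictionaries: it sorts both strings and merges the sorted character
-- runs with two pointers, comparing run lengths; objective: alternative algorithm.

-- ===== PORT A =====
def helper1 (s1 : String) (s2 : String) : Int :=
  let c1 := PySem.Dict.counter s1.toList
  let c2 := PySem.Dict.counter s2.toList
  let res : Int := 0
  let res := c1.items.foldl (fun res kv =>
    if !(c1.getD kv.1 0 == c2.getD kv.1 0) then res + 1 else res) res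
  c2.items.foldl (fun res kv =>
    if !(c1.getD kv.1 0 == c2.getD kv.1 0) then res + 1 else res) res

-- ===== PORT B =====
-- the outer while loop of Source B: each step consumes one full run of equal characters
-- (the inner whiles) from one or both sorted lists and adds that run's contribution
def mergeCount : List Char → List Char → Int
  | [], [] => 0
  | x :: xs, [] => 1 + mergeCount (xs.dropWhile (fun y => y == x)) []
  | [], y :: ys => 1 + mergeCount [] (ys.dropWhile (fun z => z == y))
  | x :: xs, y :: ys =>
    if x < y then 1 + mergeCount (xs.dropWhile (fun z => z == x)) (y :: ys)
    else if y < x then 1 + mergeCount (x :: xs) (ys.dropWhile (fun z => z == y))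
    else
      let a := 1 + (xs.takeWhile (fun z => z == x)).length
      let b := 1 + (ys.takeWhile (fun z => z == y)).length
      (if a = b then 0 else 2) + mergeCount (xs.dropWhile (fun z => z == x)) (ys.dropWhile (fun z => z == y))
termination_by l1 l2 => l1.length + l2.length
decreasing_by
  all_goals simp only [List.length_cons, List.length_nil]
  · have := List.length_dropWhile_le (fun y => y == x) xs; omega
  · have := List.length_dropWhile_le (fun z => z == y) ys; omega
  · have := List.length_dropWhile_le (fun z => z == x) xs; omega
  · have := List.length_dropWhile_le (fun z => z == y) ys; omega
  · have h1 := List.length_dropWhile_le (fun z => z == x) xs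
    have h2 := List.length_dropWhile_le (fun z => z == y) ys; omega

def helper1_alt (s1 : String) (s2 : String) : Int :=
  let t1 := PySem.List.sorted s1.toList (fun x => x) false
  let t2 := PySem.List.sorted s2.toList (fun x => x) false
  mergeCount t1 t2

-- ===== PRECONDITION & SPEC =====
def Spec_helper1 (s1 : String) (s2 : String) (out : Int) : Prop := out = helper1_alt s1 s2
instance (s1 : String) (s2 : String) (out : Int) : Decidable (Spec_helper1 s1 s2 out) := by unfold Spec_helper1; infer_instance

-- ===== CLAIM =====
def Claim_equal_helper1 : Prop := ∀ (s1 : String) (s2 : String), Dom_helper1 s1 s2 → Spec_helper1 s1 s2 (helper1 s1 s2)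

-- ===== LEMMAS AND PROOFS =====

-- the predicate A counts: this key's multiplicities in the two strings differ
def pvDiffers (u v : List Char) (k : Char) : Bool :=
  !((List.count k u : Int) == (List.count k v : Int))

-- in a sorted list headed by x, everything after the leading run of x's is > x
theorem pv_gt_of_mem_drop (x : Char) (xs : List Char)
    (hle : ∀ y ∈ xs, x ≤ y) (hs : xs.Pairwise (· ≤ ·)) :
    ∀ z ∈ xs.dropWhile (fun y => y == x), x < z := by
  induction xs with
  | nil => intro z hz; simp at hz
  | cons w ws ih =>
    intro z hz
    by_cases hw : w = x
    · subst hw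
      rw [List.dropWhile_cons_of_pos (by simp)] at hz
      exact ih (fun y hy => le_trans (hle w (by simp)) ((List.pairwise_cons.mp hs).1 y hy))
        (List.pairwise_cons.mp hs).2 z hz
    · rw [List.dropWhile_cons_of_neg (by simp [hw])] at hz
      have hxw : x < w := lt_of_le_of_ne (hle w (by simp)) (Ne.symm hw)
      rcases List.mem_cons.mp hz with rfl | hz'
      · exact hxw
      · exact lt_of_lt_of_le hxw ((List.pairwise_cons.mp hs).1 z hz')

-- the distinct elements of a sorted list are its head plus the distinct elements past its run
theorem pv_ofList_cons_run (x : Char) (xs : List Char)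
    (hx : x ∉ xs.dropWhile (fun y => y == x)) :
    (PySem.Set.ofList (x :: xs)).Perm (x :: PySem.Set.ofList (xs.dropWhile (fun y => y == x))) := by
  apply (List.perm_ext_iff_of_nodup (PySem.Set.nodup_ofList _) ?_).mpr
  · intro z
    simp only [PySem.Set.mem_ofList, List.mem_cons]
    constructor
    · rintro (rfl | hz)
      · exact Or.inl rfl
      · rw [← List.takeWhile_append_dropWhile (p := fun y => y == x) (l := xs),
          List.mem_append] at hz
        rcases hz with h | h
        · exact Or.inl (by simpa using List.mem_takeWhile_imp h)
        · exact Or.inr h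
    · rintro (rfl | hz)
      · exact Or.inl rfl
      · exact Or.inr ((List.dropWhile_sublist _).mem hz)
  · exact List.nodup_cons.mpr ⟨fun h => hx ((PySem.Set.mem_ofList _ _).mp h), PySem.Set.nodup_ofList _⟩

-- multiplicity of the head char of a sorted list = length of its leading run
theorem pv_count_head (x : Char) (xs : List Char)
    (hgt : ∀ z ∈ xs.dropWhile (fun y => y == x), x < z) :
    List.count x (x :: xs) = 1 + (xs.takeWhile (fun y => y == x)).length := by
  have h1 : List.count x xs
      = List.count x (xs.takeWhile (fun y => y == x))
        + List.count x (xs.dropWhile (fun y => y == x)) := by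
    conv_lhs => rw [← List.takeWhile_append_dropWhile (p := fun y => y == x) (l := xs)]
    exact List.count_append ..
  have h2 : List.count x (xs.takeWhile (fun y => y == x))
      = (xs.takeWhile (fun y => y == x)).length := by
    rw [List.count_eq_length]
    intro b hb
    exact (beq_iff_eq.mp (List.mem_takeWhile_imp (p := fun y => y == x) hb)).symm
  have h3 : List.count x (xs.dropWhile (fun y => y == x)) = 0 := by
    rw [List.count_eq_zero]
    intro h
    exact absurd rfl (ne_of_gt (hgt x h))
  rw [List.count_cons_self, h1, h2, h3]
  omega

-- multiplicity of any char other than the head is unchanged by dropping the head run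
theorem pv_count_drop (x k : Char) (xs : List Char) (hk : k ≠ x) :
    List.count k (x :: xs) = List.count k (xs.dropWhile (fun y => y == x)) := by
  have h1 : List.count k xs
      = List.count k (xs.takeWhile (fun y => y == x))
        + List.count k (xs.dropWhile (fun y => y == x)) := by
    conv_lhs => rw [← List.takeWhile_append_dropWhile (p := fun y => y == x) (l := xs)]
    exact List.count_append ..
  have h2 : List.count k (xs.takeWhile (fun y => y == x)) = 0 := by
    rw [List.count_eq_zero]
    intro h
    exact hk (by simpa using List.mem_takeWhile_imp h)
  rw [List.count_cons_of_ne (Ne.symm hk), h1, h2]; omega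

-- the predicate is unchanged when the multiplicities are
theorem pv_differs_congr (u u' v v' : List Char) (k : Char)
    (h1 : List.count k u = List.count k u') (h2 : List.count k v = List.count k v') :
    pvDiffers u v k = pvDiffers u' v' k := by
  unfold pvDiffers; rw [h1, h2]

theorem pv_differs_true (u v : List Char) (k : Char) (h : List.count k u ≠ List.count k v) :
    pvDiffers u v k = true := by
  unfold pvDiffers; simp; omega

-- packaged facts about the leading run of a sorted nonempty list
theorem pv_run_facts (x : Char) (xs : List Char) (hs : (x :: xs).Pairwise (· ≤ ·)) :
    (∀ z ∈ xs.dropWhile (fun y => y == x), x < z) ∧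
    (xs.dropWhile (fun y => y == x)).Pairwise (· ≤ ·) ∧
    (PySem.Set.ofList (x :: xs)).Perm (x :: PySem.Set.ofList (xs.dropWhile (fun y => y == x))) := by
  obtain ⟨hle, hxs⟩ := List.pairwise_cons.mp hs
  have hgt := pv_gt_of_mem_drop x xs hle hxs
  exact ⟨hgt, List.Pairwise.sublist (List.dropWhile_sublist _) hxs,
    pv_ofList_cons_run x xs (fun h => lt_irrefl x (hgt x h))⟩

-- main loop invariant: on sorted lists, the merge equals A's two-sided differing-key count
theorem pv_merge_eq (n : Nat) : ∀ (l1 l2 : List Char), l1.length + l2.length ≤ n →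
    l1.Pairwise (· ≤ ·) → l2.Pairwise (· ≤ ·) →
    mergeCount l1 l2
      = ((PySem.Set.ofList l1).countP (pvDiffers l1 l2) : Int)
        + ((PySem.Set.ofList l2).countP (pvDiffers l1 l2) : Int) := by
  induction n with
  | zero =>
    intro l1 l2 hlen _ _
    have h1 : l1 = [] := by cases l1 <;> simp_all
    have h2 : l2 = [] := by cases l2 <;> simp_all
    subst h1; subst h2
    simp [mergeCount, PySem.Set.ofList_nil]
  | succ n ih =>
    intro l1 l2 hlen hs1 hs2
    match l1, l2 with
    | [], [] => simp [mergeCount, PySem.Set.ofList_nil]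
    | x :: xs, [] =>
      obtain ⟨hgt, hsr, hperm⟩ := pv_run_facts x xs hs1
      set r := xs.dropWhile (fun y => y == x) with hr
      have hrec := ih r [] (by
        have h := List.length_dropWhile_le (fun y => y == x) xs
        rw [← hr] at h
        simp only [List.length_cons, List.length_nil] at hlen ⊢; omega) hsr (by simp)
      have hpx : pvDiffers (x :: xs) [] x = true := by
        apply pv_differs_true; simp [List.count_cons_self]
      have hcongr : (PySem.Set.ofList r).countP (pvDiffers (x :: xs) [])
          = (PySem.Set.ofList r).countP (pvDiffers r []) := by
        apply List.countP_congr
        intro k hk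
        have hx : x < k := hgt k ((PySem.Set.mem_ofList _ _).mp hk)
        rw [pv_differs_congr (x :: xs) r [] [] k (pv_count_drop x k xs (ne_of_gt hx)) rfl]
      rw [mergeCount, hrec, hperm.countP_eq, List.countP_cons, hpx, hcongr]
      simp only [PySem.Set.ofList_nil, List.countP_nil]
      push_cast; ring
    | [], y :: ys =>
      obtain ⟨hgt, hsr, hperm⟩ := pv_run_facts y ys hs2
      set r := ys.dropWhile (fun z => z == y) with hr
      have hrec := ih [] r (by
        have h := List.length_dropWhile_le (fun z => z == y) ys
        rw [← hr] at h
        simp only [List.length_cons, List.length_nil] at hlen ⊢; omega) (by simp) hsr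
      have hpy : pvDiffers [] (y :: ys) y = true := by
        apply pv_differs_true; simp [List.count_cons_self]
      have hcongr : (PySem.Set.ofList r).countP (pvDiffers [] (y :: ys))
          = (PySem.Set.ofList r).countP (pvDiffers [] r) := by
        apply List.countP_congr
        intro k hk
        have hy : y < k := hgt k ((PySem.Set.mem_ofList _ _).mp hk)
        rw [pv_differs_congr [] [] (y :: ys) r k rfl (pv_count_drop y k ys (ne_of_gt hy))]
      rw [mergeCount, hrec, hperm.countP_eq, List.countP_cons, hpy, hcongr]
      simp only [PySem.Set.ofList_nil, List.countP_nil]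
      push_cast; ring
    | x :: xs, y :: ys =>
      obtain ⟨hgt1, hsr1, hperm1⟩ := pv_run_facts x xs hs1
      obtain ⟨hgt2, hsr2, hperm2⟩ := pv_run_facts y ys hs2
      set r1 := xs.dropWhile (fun z => z == x) with hr1
      set r2 := ys.dropWhile (fun z => z == y) with hr2
      have hlen1 : r1.length ≤ xs.length := by
        rw [hr1]; exact List.length_dropWhile_le (fun z => z == x) xs
      have hlen2 : r2.length ≤ ys.length := by
        rw [hr2]; exact List.length_dropWhile_le (fun z => z == y) ys
      simp only [List.length_cons] at hlen
      -- membership in the other sorted list bounds the key from below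
      have hmem2 : ∀ k ∈ PySem.Set.ofList (y :: ys), y ≤ k := by
        intro k hk
        rcases List.mem_cons.mp ((PySem.Set.mem_ofList _ _).mp hk) with rfl | h
        · exact le_refl _
        · exact (List.pairwise_cons.mp hs2).1 k h
      have hmem1 : ∀ k ∈ PySem.Set.ofList (x :: xs), x ≤ k := by
        intro k hk
        rcases List.mem_cons.mp ((PySem.Set.mem_ofList _ _).mp hk) with rfl | h
        · exact le_refl _
        · exact (List.pairwise_cons.mp hs1).1 k h
      by_cases hxy : x < y
      · have hrec := ih r1 (y :: ys) (by simp only [List.length_cons]; omega) hsr1 hs2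
        have hpx : pvDiffers (x :: xs) (y :: ys) x = true := by
          apply pv_differs_true
          have h0 : List.count x (y :: ys) = 0 := by
            rw [List.count_eq_zero]
            intro h
            exact absurd (lt_of_lt_of_le hxy (hmem2 x ((PySem.Set.mem_ofList _ _).mpr h))) (lt_irrefl x)
          simp [List.count_cons_self, h0]
        have hc1 : (PySem.Set.ofList r1).countP (pvDiffers (x :: xs) (y :: ys))
            = (PySem.Set.ofList r1).countP (pvDiffers r1 (y :: ys)) := by
          apply List.countP_congr
          intro k hk
          have hx : x < k := hgt1 k ((PySem.Set.mem_ofList _ _).mp hk)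
          rw [pv_differs_congr (x :: xs) r1 (y :: ys) (y :: ys) k
            (pv_count_drop x k xs (ne_of_gt hx)) rfl]
        have hc2 : (PySem.Set.ofList (y :: ys)).countP (pvDiffers (x :: xs) (y :: ys))
            = (PySem.Set.ofList (y :: ys)).countP (pvDiffers r1 (y :: ys)) := by
          apply List.countP_congr
          intro k hk
          have hx : x < k := lt_of_lt_of_le hxy (hmem2 k hk)
          rw [pv_differs_congr (x :: xs) r1 (y :: ys) (y :: ys) k
            (pv_count_drop x k xs (ne_of_gt hx)) rfl]
        rw [mergeCount, if_pos hxy, hrec, hperm1.countP_eq, List.countP_cons, hpx, hc1, hc2]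
        simp only [if_true]
        push_cast; ring
      · by_cases hyx : y < x
        · have hrec := ih (x :: xs) r2 (by simp only [List.length_cons]; omega) hs1 hsr2
          have hpy : pvDiffers (x :: xs) (y :: ys) y = true := by
            apply pv_differs_true
            have h0 : List.count y (x :: xs) = 0 := by
              rw [List.count_eq_zero]
              intro h
              exact absurd (lt_of_lt_of_le hyx (hmem1 y ((PySem.Set.mem_ofList _ _).mpr h))) (lt_irrefl y)
            simp [List.count_cons_self, h0]
          have hc1 : (PySem.Set.ofList (x :: xs)).countP (pvDiffers (x :: xs) (y :: ys))
              = (PySem.Set.ofList (x :: xs)).countP (pvDiffers (x :: xs) r2) := by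
            apply List.countP_congr
            intro k hk
            have hy : y < k := lt_of_lt_of_le hyx (hmem1 k hk)
            rw [pv_differs_congr (x :: xs) (x :: xs) (y :: ys) r2 k rfl
              (pv_count_drop y k ys (ne_of_gt hy))]
          have hc2 : (PySem.Set.ofList r2).countP (pvDiffers (x :: xs) (y :: ys))
              = (PySem.Set.ofList r2).countP (pvDiffers (x :: xs) r2) := by
            apply List.countP_congr
            intro k hk
            have hy : y < k := hgt2 k ((PySem.Set.mem_ofList _ _).mp hk)
            rw [pv_differs_congr (x :: xs) (x :: xs) (y :: ys) r2 k rfl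
              (pv_count_drop y k ys (ne_of_gt hy))]
          rw [mergeCount, if_neg hxy, if_pos hyx, hrec, hperm2.countP_eq, List.countP_cons,
            hpy, hc1, hc2]
          simp only [if_true]
          push_cast; ring
        · have hxyeq : x = y := le_antisymm (not_lt.mp hyx) (not_lt.mp hxy)
          subst hxyeq
          have hrec := ih r1 r2 (by omega) hsr1 hsr2
          have ha : List.count x (x :: xs) = 1 + (xs.takeWhile (fun z => z == x)).length :=
            pv_count_head x xs hgt1
          have hb : List.count x (x :: ys) = 1 + (ys.takeWhile (fun z => z == x)).length :=
            pv_count_head x ys hgt2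
          have hc1 : (PySem.Set.ofList r1).countP (pvDiffers (x :: xs) (x :: ys))
              = (PySem.Set.ofList r1).countP (pvDiffers r1 r2) := by
            apply List.countP_congr
            intro k hk
            have hx : x < k := hgt1 k ((PySem.Set.mem_ofList _ _).mp hk)
            rw [pv_differs_congr (x :: xs) r1 (x :: ys) r2 k
              (pv_count_drop x k xs (ne_of_gt hx)) (pv_count_drop x k ys (ne_of_gt hx))]
          have hc2 : (PySem.Set.ofList r2).countP (pvDiffers (x :: xs) (x :: ys))
              = (PySem.Set.ofList r2).countP (pvDiffers r1 r2) := by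
            apply List.countP_congr
            intro k hk
            have hx : x < k := hgt2 k ((PySem.Set.mem_ofList _ _).mp hk)
            rw [pv_differs_congr (x :: xs) r1 (x :: ys) r2 k
              (pv_count_drop x k xs (ne_of_gt hx)) (pv_count_drop x k ys (ne_of_gt hx))]
          rw [mergeCount, if_neg hxy, if_neg hyx, hrec, hperm1.countP_eq, hperm2.countP_eq,
            List.countP_cons, List.countP_cons, hc1, hc2]
          by_cases hab : 1 + (xs.takeWhile (fun z => z == x)).length
              = 1 + (ys.takeWhile (fun z => z == x)).length
          · have hpx : pvDiffers (x :: xs) (x :: ys) x = false := by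
              unfold pvDiffers
              rw [ha, hb, hab]
              simp
            rw [hpx]
            simp only [if_pos hab, Bool.false_eq_true, if_false]
            push_cast; ring
          · have hpx : pvDiffers (x :: xs) (x :: ys) x = true := by
              apply pv_differs_true
              rw [ha, hb]; exact hab
            rw [hpx]
            simp only [if_neg hab, if_true]
            push_cast; ring

-- distinct-element lists of permuted lists are permuted
theorem pv_ofList_perm (u v : List Char) (h : u.Perm v) :
    (PySem.Set.ofList u).Perm (PySem.Set.ofList v) := by
  apply (List.perm_ext_iff_of_nodup (PySem.Set.nodup_ofList _) (PySem.Set.nodup_ofList _)).mpr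
  intro z
  rw [PySem.Set.mem_ofList, PySem.Set.mem_ofList]
  exact h.mem_iff

-- ===== VERDICT =====
theorem helper1_spec : Claim_equal_helper1 := by
  intro s1 s2 _
  unfold Spec_helper1 helper1 helper1_alt
  simp only [PySem.Dict.items_counter, PySem.Dict.getD_counter, List.foldl_map,
    PySem.List.foldl_if_add_one]
  have hp1 : (PySem.List.sorted s1.toList (fun x => x) false).Pairwise (· ≤ ·) := by
    simpa using PySem.List.sorted_pairwise s1.toList (fun x => x)
  have hp2 : (PySem.List.sorted s2.toList (fun x => x) false).Pairwise (· ≤ ·) := by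
    simpa using PySem.List.sorted_pairwise s2.toList (fun x => x)
  rw [pv_merge_eq _ _ _ le_rfl hp1 hp2]
  have hq1 : (PySem.List.sorted s1.toList (fun x => x) false).Perm s1.toList :=
    PySem.List.sorted_perm s1.toList (fun x => x) false
  have hq2 : (PySem.List.sorted s2.toList (fun x => x) false).Perm s2.toList :=
    PySem.List.sorted_perm s2.toList (fun x => x) false
  have hpeq : pvDiffers (PySem.List.sorted s1.toList (fun x => x) false)
      (PySem.List.sorted s2.toList (fun x => x) false) = pvDiffers s1.toList s2.toList := by
    funext k
    unfold pvDiffers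
    rw [hq1.count_eq, hq2.count_eq]
  rw [hpeq, (pv_ofList_perm _ _ hq1).countP_eq, (pv_ofList_perm _ _ hq2).countP_eq]
  unfold pvDiffers
  ring
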